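-- pv_equiv track=rewrite | github.com/chausler/tropical_forest | preprocessing/preprocessing.py | merge_components
-- ===== SOURCE A (Python) =====
-- NOUN_TYPES = ('NN','NNS','NNP','NNPS')
--
-- def merge_components(sent_components):
--     """
--     complexity: O(n)
--     merge adjacement nouns together
--     merge adjacement nouns with one adjative
--     :param sent_components:
--     :return: merged sent_components
--     """
--     prev = None
--     merged = []
--     for w, t in sent_components:
--         if prev in NOUN_TYPES and t in NOUN_TYPES:
--             last = merged[-1]
--             new_word = last[0] + '_' + w
--             merged[-1] = (new_word, t)
--
--         elif prev == 'JJ' and t in NOUN_TYPES: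
--             last = merged[-1]
--             new_word = last[0] + '_' + w
--             merged[-1] = (new_word, t)
--         else:
--             merged.append((w, t))
--         prev = t
--     return merged
-- ===== SOURCE B (Python) =====
-- NOUN_TYPES = ('NN','NNS','NNP','NNPS')
--
-- def merge_components(sent_components):
--     """Run-consuming rewrite: scan with an index, greedily absorb each
--     mergeable run of following nouns into the current token, then emit it."""
--     out = []
--     i = 0
--     n = len(sent_components)
--     while i < n:
--         w, t = sent_components[i]
--         while i + 1 < n and (t in NOUN_TYPES or t == 'JJ') \
--                 and sent_components[i + 1][1] in NOUN_TYPES: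
--             i += 1
--             w2, t2 = sent_components[i]
--             w = w + '_' + w2
--             t = t2
--         out.append((w, t))
--         i += 1
--     return out
-- ===== Notes on version B (the rewrite author's own statement) =====
-- stated objective: alternative
-- what changed: Replaces A's single fold that repeatedly reads and rewrites merged[-1] with an index-based outer loop whose inner loop greedily absorbs each mergeable run of nouns into the current token before emitting it once.
import Mathlib
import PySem

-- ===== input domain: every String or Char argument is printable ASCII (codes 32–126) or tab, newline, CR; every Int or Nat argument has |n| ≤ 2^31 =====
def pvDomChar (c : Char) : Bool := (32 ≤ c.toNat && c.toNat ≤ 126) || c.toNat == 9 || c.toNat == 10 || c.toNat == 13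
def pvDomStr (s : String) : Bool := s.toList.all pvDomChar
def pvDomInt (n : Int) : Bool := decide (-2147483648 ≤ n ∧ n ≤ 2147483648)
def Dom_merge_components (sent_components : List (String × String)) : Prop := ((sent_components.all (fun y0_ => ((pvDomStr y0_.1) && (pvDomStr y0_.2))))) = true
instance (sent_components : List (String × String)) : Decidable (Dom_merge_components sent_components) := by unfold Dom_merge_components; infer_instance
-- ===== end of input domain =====

-- B replaces A's fold that rewrites merged[-1] by an index scan that greedily absorbs each
-- mergeable run into the current token before emitting it (objective: alternative decomposition).

-- ===== PORT A =====
-- t in NOUN_TYPES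
def pvIsNoun (t : String) : Bool := t == "NN" || t == "NNS" || t == "NNP" || t == "NNPS"

-- prev in NOUN_TYPES (prev : Option String; None is in no tuple)
def pvPrevNoun (prev : Option String) : Bool :=
  match prev with
  | some p => pvIsNoun p
  | none => false

-- merged[-1] = (merged[-1][0] + '_' + w, t); the none branch is unreachable (only taken with prev set)
def pvSetLast (merged : List (String × String)) (w t : String) : List (String × String) :=
  match merged.getLast? with
  | some last => merged.dropLast ++ [(last.1 ++ "_" ++ w, t)]
  | none => merged

-- the for-loop of A, state (prev, merged)
def pvLoopA : Option String → List (String × String) → List (String × String) → List (String × String)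
  | _, merged, [] => merged
  | prev, merged, (w, t) :: rest =>
    if pvPrevNoun prev && pvIsNoun t then
      pvLoopA (some t) (pvSetLast merged w t) rest
    else if prev == some "JJ" && pvIsNoun t then
      pvLoopA (some t) (pvSetLast merged w t) rest
    else
      pvLoopA (some t) (merged ++ [(w, t)]) rest

def merge_components (sent_components : List (String × String)) : List (String × String) :=
  pvLoopA none [] sent_components

-- ===== PORT B =====
-- the inner while-loop of B: absorb the mergeable run following the current token (w, t);
-- returns the finished token and the remaining suffix
def pvRun : String → String → List (String × String) → String × String × List (String × String)
  | w, t, [] => (w, t, [])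
  | w, t, (w2, t2) :: rest =>
    if (pvIsNoun t || t == "JJ") && pvIsNoun t2 then
      pvRun (w ++ "_" ++ w2) t2 rest
    else
      (w, t, (w2, t2) :: rest)

theorem pvRun_suffix_len : ∀ (rest : List (String × String)) (w t : String),
    (pvRun w t rest).2.2.length ≤ rest.length := by
  intro rest
  induction rest with
  | nil => intro w t; simp [pvRun]
  | cons p rest ih =>
    intro w t
    obtain ⟨w2, t2⟩ := p
    simp only [pvRun]
    split
    · exact le_trans (ih _ _) (Nat.le_succ _)
    · simp

-- the outer while-loop of B
def pvLoopB : List (String × String) → List (String × String)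
  | [] => []
  | (w, t) :: rest =>
    let r := pvRun w t rest
    (r.1, r.2.1) :: pvLoopB r.2.2
termination_by l => l.length
decreasing_by
  exact Nat.lt_succ_of_le (pvRun_suffix_len rest w t)

def merge_components_alt (sent_components : List (String × String)) : List (String × String) :=
  pvLoopB sent_components

-- ===== PRECONDITION & SPEC =====
def Spec_merge_components (sent_components : List (String × String)) (out : List (String × String)) : Prop := out = merge_components_alt sent_components
instance (sent_components : List (String × String)) (out : List (String × String)) : Decidable (Spec_merge_components sent_components out) := by unfold Spec_merge_components; infer_instance

-- ===== CLAIM (what is proved, stated in full; the proofs are below) =====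
def Claim_equal_merge_components : Prop := ∀ (sent_components : List (String × String)), Dom_merge_components sent_components → Spec_merge_components sent_components (merge_components sent_components)

-- ===== LEMMAS AND PROOFS =====

theorem pvSetLast_append (init : List (String × String)) (word tOld w t : String) :
    pvSetLast (init ++ [(word, tOld)]) w t = init ++ [(word ++ "_" ++ w, t)] := by
  simp [pvSetLast]

-- A's loop, started just after a token (word, t) was emitted, equals init ++ B's processing
-- of the current run and the remainder.
theorem pvLoopA_eq_run : ∀ (rest init : List (String × String)) (word t : String),
    pvLoopA (some t) (init ++ [(word, t)]) rest =
      init ++ ((pvRun word t rest).1, (pvRun word t rest).2.1) :: pvLoopB (pvRun word t rest).2.2 := by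
  suffices h : ∀ (n : Nat) (rest : List (String × String)), rest.length ≤ n →
      ∀ init word t, pvLoopA (some t) (init ++ [(word, t)]) rest =
        init ++ ((pvRun word t rest).1, (pvRun word t rest).2.1) :: pvLoopB (pvRun word t rest).2.2 by
    exact fun rest => h rest.length rest le_rfl
  intro n
  induction n with
  | zero =>
    intro rest hlen init word t
    have : rest = [] := List.length_eq_zero_iff.mp (Nat.le_zero.mp hlen)
    subst this
    simp [pvLoopA, pvRun, pvLoopB]
  | succ n ih =>
    intro rest hlen init word t
    cases rest with
    | nil => simp [pvLoopA, pvRun, pvLoopB]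
    | cons p rest' =>
      obtain ⟨w2, t2⟩ := p
      have hlen' : rest'.length ≤ n := by simpa using hlen
      by_cases hm : ((pvIsNoun t || t == "JJ") && pvIsNoun t2) = true
      · -- token (w2,t2) is absorbed into the run
        have hA : (pvPrevNoun (some t) && pvIsNoun t2) = true ∨
            ((some t == some "JJ") && pvIsNoun t2) = true := by
          have hm' := hm
          simp only [Bool.and_eq_true, Bool.or_eq_true] at hm'
          obtain ⟨h1, h2⟩ := hm'
          simp only [pvPrevNoun]
          rcases h1 with h | h
          · exact Or.inl (by simp [h, h2])
          · exact Or.inr (by simp [h, h2])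
        have hrec := ih rest' hlen' init (word ++ "_" ++ w2) t2
        rcases hA with h | h
        · simpa [pvLoopA, h, pvSetLast_append, pvRun, hm] using hrec
        · simp only [pvLoopA]
          split
          · simpa [pvSetLast_append, pvRun, hm] using hrec
          · simpa [h, pvSetLast_append, pvRun, hm] using hrec
      · -- run ends: (word, t) is final, restart from (w2, t2)
        have hA1 : (pvPrevNoun (some t) && pvIsNoun t2) = false := by
          simp only [pvPrevNoun]
          simp only [Bool.and_eq_true, Bool.or_eq_true, not_and_or] at hm ⊢
          rcases hm with h | h
          · rcases Bool.eq_false_iff.mpr (fun hc => h (Or.inl hc)) with h'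
            simp [h']
          · simp [Bool.eq_false_iff.mpr h]
        have hA2 : ((some t == some "JJ") && pvIsNoun t2) = false := by
          simp only [Bool.and_eq_true, Bool.or_eq_true, not_and_or] at hm
          rcases hm with h | h
          · have : (t == "JJ") = false := Bool.eq_false_iff.mpr (fun hc => h (Or.inr hc))
            simp_all
          · simp [Bool.eq_false_iff.mpr h]
        have hrec := ih rest' hlen' (init ++ [(word, t)]) w2 t2
        simp only [pvLoopA, hA1, hA2, Bool.false_eq_true, if_false]
        rw [hrec]
        have hB : pvRun word t ((w2, t2) :: rest') = (word, t, (w2, t2) :: rest') := by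
          simp [pvRun, hm]
        rw [hB]
        simp [pvLoopB]

-- ===== VERDICT (by name: the statement is the Claim_ definition above) =====
theorem merge_components_spec : Claim_equal_merge_components := by
  intro sc _
  unfold Spec_merge_components merge_components merge_components_alt
  cases sc with
  | nil => simp [pvLoopA, pvLoopB]
  | cons p rest =>
    obtain ⟨w, t⟩ := p
    have h0 : pvLoopA none [] ((w, t) :: rest) = pvLoopA (some t) ([] ++ [(w, t)]) rest := by
      simp [pvLoopA, pvPrevNoun]
    rw [h0, pvLoopA_eq_run]
    simp [pvLoopB]
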